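-- pv_equiv track=rewrite | github.com/karljayg/twitch-gpt-chat-bot | core/handlers/fsl_query_handler.py | _h2h_series_summary
-- ===== SOURCE A (Python) =====
-- from typing import Any, Dict, List, Optional, Tuple
--
-- def _name_in_display(name: str, cell: Optional[str]) -> bool:
--     n, v = name.lower().strip(), (cell or "").lower().strip()
--     if not n or not v:
--         return False
--     return n in v or v in n
--
-- def _norm_name(s: str) -> str:
--     return " ".join((s or "").lower().split())
--
-- def _h2h_name_match_score(query: str, display_name: str) -> int:
--     """
--     Score how well `query` (viewer phrase) refers to `display_name` (DB Real_Name).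
--     Higher = stronger. Avoids bug where both queries substring-match the same winner
--     (e.g. 'little' vs 'littlereaper' vs winner LittleReaper) and only the first `if` branch counted.
--     """
--     q = _norm_name(query)
--     d = _norm_name(display_name)
--     if not q or not d:
--         return 0
--     if q == d:
--         return 2000 + len(q)
--     if len(q) >= 3 and q in d:
--         return 1000 + len(q)
--     if len(d) >= 3 and d in q:
--         return 800 + len(d)
--     return 0
--
-- def _h2h_winner_side(raw_a: str, raw_b: str, winner_name: Optional[str]) -> Optional[int]:
--     """0 = raw_a won series, 1 = raw_b won, None if unclear."""
--     if not winner_name: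
--         return None
--     sa = _h2h_name_match_score(raw_a, winner_name)
--     sb = _h2h_name_match_score(raw_b, winner_name)
--
--     def _prefer_longer_query() -> int:
--         la, lb = len(_norm_name(raw_a)), len(_norm_name(raw_b))
--         return 0 if la >= lb else 1
--
--     if sa == 0 and sb == 0:
--         ma = _name_in_display(raw_a, winner_name)
--         mb = _name_in_display(raw_b, winner_name)
--         if ma and not mb:
--             return 0
--         if mb and not ma:
--             return 1
--         if ma and mb:
--             return _prefer_longer_query()
--         return None
--
--     if sa > sb:
--         return 0
--     if sb > sa:
--         return 1
--     return _prefer_longer_query()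
--
-- def _h2h_series_summary(rows: List[Dict[str, Any]], raw_a: str, raw_b: str) -> str:
--     if not rows:
--         return ""
--     wa = wb = 0
--     unmatched = 0
--     for r in rows:
--         win = r.get("winner_name")
--         side = _h2h_winner_side(raw_a, raw_b, win if isinstance(win, str) else None)
--         if side == 0:
--             wa += 1
--         elif side == 1:
--             wb += 1
--         else:
--             unmatched += 1
--     n = len(rows)
--     head = f"Head-to-head (FSL series in this list, n={n}): {raw_a} {wa} - {wb} {raw_b}."
--     if unmatched:
--         head += f" ({unmatched} row(s) could not attribute winner to either name — check spelling.)"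
--     return head
-- ===== SOURCE B (Python) =====
-- from typing import Any, Dict, List, Optional
-- from collections import Counter
--
--
-- def _norm(s: str) -> str:
--     return " ".join((s or "").lower().split())
--
--
-- def _score(query: str, display_name: str) -> int:
--     q, d = _norm(query), _norm(display_name)
--     if q and d:
--         if q == d:
--             return 2000 + len(q)
--         if q in d and len(q) >= 3:
--             return 1000 + len(q)
--         if d in q and len(d) >= 3:
--             return 800 + len(d)
--     return 0
--
--
-- def _loose(name: str, cell: str) -> bool:
--     n, v = name.lower().strip(), cell.lower().strip()
--     return bool(n) and bool(v) and (n in v or v in n)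
--
--
-- def _prefer(raw_a: str, raw_b: str) -> int:
--     return 1 if len(_norm(raw_a)) < len(_norm(raw_b)) else 0
--
--
-- def _side(raw_a: str, raw_b: str, winner: Optional[str]) -> Optional[int]:
--     if not winner:
--         return None
--     sa, sb = _score(raw_a, winner), _score(raw_b, winner)
--     if (sa, sb) != (0, 0):
--         if sa != sb:
--             return 0 if sa > sb else 1
--         return _prefer(raw_a, raw_b)
--     ma, mb = _loose(raw_a, winner), _loose(raw_b, winner)
--     if ma == mb:
--         return _prefer(raw_a, raw_b) if ma else None
--     return 0 if ma else 1
--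
--
-- def _h2h_series_summary(rows: List[Dict[str, Any]], raw_a: str, raw_b: str) -> str:
--     if not rows:
--         return ""
--     w = [r.get("winner_name") for r in rows]
--     counts = Counter(k if isinstance(k, str) else None for k in w)
--     wa = sum(c for k, c in counts.items() if _side(raw_a, raw_b, k) == 0)
--     wb = sum(c for k, c in counts.items() if _side(raw_a, raw_b, k) == 1)
--     unmatched = sum(c for k, c in counts.items() if _side(raw_a, raw_b, k) is None)
--     head = (f"Head-to-head (FSL series in this list, n={len(rows)}): "
--             f"{raw_a} {wa} - {wb} {raw_b}.")
--     tail = (f" ({unmatched} row(s) could not attribute winner to either name — check spelling.)"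
--             if unmatched else "")
--     return head + tail
-- ===== Notes on version B (the rewrite author's own statement) =====
-- stated objective: alternative
-- what changed: B builds a Counter of normalized winner keys in one pass and then computes wa/wb/unmatched as three weighted sums over the DISTINCT keys (one _side classification per distinct winner, with a restructured decision helper), instead of A's single per-row accumulator loop that re-scores every row.
import Mathlib
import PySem

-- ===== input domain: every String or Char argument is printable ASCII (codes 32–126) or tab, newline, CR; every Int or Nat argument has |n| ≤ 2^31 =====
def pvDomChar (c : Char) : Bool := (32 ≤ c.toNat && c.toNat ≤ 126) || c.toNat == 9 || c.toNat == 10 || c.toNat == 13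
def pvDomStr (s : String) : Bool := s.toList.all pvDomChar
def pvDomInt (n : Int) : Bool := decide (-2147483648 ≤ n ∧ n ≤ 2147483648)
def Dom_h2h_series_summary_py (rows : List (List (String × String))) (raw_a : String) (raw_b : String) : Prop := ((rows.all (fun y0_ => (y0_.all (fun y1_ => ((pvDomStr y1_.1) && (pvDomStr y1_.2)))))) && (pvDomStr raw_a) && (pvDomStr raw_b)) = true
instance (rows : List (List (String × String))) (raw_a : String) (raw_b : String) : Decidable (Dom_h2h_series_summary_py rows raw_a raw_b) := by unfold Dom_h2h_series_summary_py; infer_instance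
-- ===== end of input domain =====

-- B replaces A's single per-row accumulator loop by a Counter of winner keys followed by
-- three weighted sums over the DISTINCT keys, with a restructured side-decision helper
-- (objective: alternative decomposition; one classification per distinct winner).

-- ===== PORT A =====
-- module helpers as Source A writes them
def pvNormName (s : String) : String :=
  PySem.Str.join " " (PySem.Str.split₀ (PySem.Str.lower s))

def pvNameInDisplay (name : String) (cell : Option String) : Bool :=
  let n := PySem.Str.strip (PySem.Str.lower name)
  let v := PySem.Str.strip (PySem.Str.lower (cell.getD ""))
  if n = "" || v = "" then false
  else PySem.Str.isIn n v || PySem.Str.isIn v n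

def pvScore (query : String) (display_name : String) : Int :=
  let q := pvNormName query
  let d := pvNormName display_name
  if q = "" || d = "" then 0
  else if q = d then 2000 + PySem.Str.len q
  else if 3 ≤ PySem.Str.len q ∧ PySem.Str.isIn q d then 1000 + PySem.Str.len q
  else if 3 ≤ PySem.Str.len d ∧ PySem.Str.isIn d q then 800 + PySem.Str.len d
  else 0

def pvPreferLongerQuery (raw_a raw_b : String) : Int :=
  if PySem.Str.len (pvNormName raw_b) ≤ PySem.Str.len (pvNormName raw_a) then 0 else 1

def pvWinnerSide (raw_a raw_b : String) (winner_name : Option String) : Option Int :=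
  match winner_name with
  | none => none
  | some w =>
    if w = "" then none   -- 'if not winner_name'
    else
      let sa := pvScore raw_a w
      let sb := pvScore raw_b w
      if sa = 0 ∧ sb = 0 then
        let ma := pvNameInDisplay raw_a (some w)
        let mb := pvNameInDisplay raw_b (some w)
        if ma && !mb then some 0
        else if mb && !ma then some 1
        else if ma && mb then some (pvPreferLongerQuery raw_a raw_b)
        else none
      else if sb < sa then some 0
      else if sa < sb then some 1
      else some (pvPreferLongerQuery raw_a raw_b)

-- A: one pass over the rows, classifying every row's winner into a running triple
def h2h_series_summary_py (rows : List (List (String × String))) (raw_a : String) (raw_b : String) : String :=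
  if rows = [] then ""
  else
    let st : Int × Int × Int := rows.foldl (fun t r =>
      let win := (PySem.Dict.mk r).get? "winner_name"
      let side := pvWinnerSide raw_a raw_b win
      if side = some 0 then (t.1 + 1, t.2.1, t.2.2)
      else if side = some 1 then (t.1, t.2.1 + 1, t.2.2)
      else (t.1, t.2.1, t.2.2 + 1)) (0, 0, 0)
    let n : Int := rows.length
    let head := "Head-to-head (FSL series in this list, n=" ++ PySem.Int.toStr n ++ "): " ++
      raw_a ++ " " ++ PySem.Int.toStr st.1 ++ " - " ++ PySem.Int.toStr st.2.1 ++ " " ++ raw_b ++ "."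
    if st.2.2 ≠ 0 then
      head ++ " (" ++ PySem.Int.toStr st.2.2 ++ " row(s) could not attribute winner to either name — check spelling.)"
    else head

-- ===== PORT B =====
-- Source B's own helper decomposition
def altNorm (s : String) : String :=
  PySem.Str.join " " (PySem.Str.split₀ (PySem.Str.lower s))

def altScore (query : String) (display_name : String) : Int :=
  let q := altNorm query
  let d := altNorm display_name
  if q ≠ "" ∧ d ≠ "" then
    if q = d then 2000 + PySem.Str.len q
    else if PySem.Str.isIn q d ∧ 3 ≤ PySem.Str.len q then 1000 + PySem.Str.len q
    else if PySem.Str.isIn d q ∧ 3 ≤ PySem.Str.len d then 800 + PySem.Str.len d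
    else 0
  else 0

def altLoose (name : String) (cell : String) : Bool :=
  let n := PySem.Str.strip (PySem.Str.lower name)
  let v := PySem.Str.strip (PySem.Str.lower cell)
  !(n == "") && !(v == "") && (PySem.Str.isIn n v || PySem.Str.isIn v n)

def altPrefer (raw_a raw_b : String) : Int :=
  if PySem.Str.len (altNorm raw_a) < PySem.Str.len (altNorm raw_b) then 1 else 0

def altSide (raw_a raw_b : String) (winner : Option String) : Option Int :=
  match winner with
  | none => none
  | some w =>
    if w = "" then none   -- 'if not winner'
    else
      let sa := altScore raw_a w
      let sb := altScore raw_b w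
      if ¬ (sa = 0 ∧ sb = 0) then
        if sa ≠ sb then (if sb < sa then some 0 else some 1)
        else some (altPrefer raw_a raw_b)
      else
        let ma := altLoose raw_a w
        let mb := altLoose raw_b w
        if ma = mb then (if ma then some (altPrefer raw_a raw_b) else none)
        else if ma then some 0 else some 1

-- B: Counter over the winner keys, then three weighted sums over the distinct keys
def h2h_series_summary_py_alt (rows : List (List (String × String))) (raw_a : String) (raw_b : String) : String :=
  if rows = [] then ""
  else
    let w := rows.map (fun r => (PySem.Dict.mk r).get? "winner_name")
    let counts := PySem.Dict.counter w
    let wa : Int := ((counts.items.filter (fun kc => altSide raw_a raw_b kc.1 == some 0)).map Prod.snd).sum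
    let wb : Int := ((counts.items.filter (fun kc => altSide raw_a raw_b kc.1 == some 1)).map Prod.snd).sum
    let unmatched : Int := ((counts.items.filter (fun kc => altSide raw_a raw_b kc.1 == none)).map Prod.snd).sum
    let head := "Head-to-head (FSL series in this list, n=" ++ PySem.Int.toStr rows.length ++ "): " ++
      raw_a ++ " " ++ PySem.Int.toStr wa ++ " - " ++ PySem.Int.toStr wb ++ " " ++ raw_b ++ "."
    let tail := if unmatched ≠ 0 then
      " (" ++ PySem.Int.toStr unmatched ++ " row(s) could not attribute winner to either name — check spelling.)"
      else ""
    head ++ tail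

-- ===== PRECONDITION & SPEC =====
def Spec_h2h_series_summary_py (rows : List (List (String × String))) (raw_a : String) (raw_b : String) (out : String) : Prop := out = h2h_series_summary_py_alt rows raw_a raw_b
instance (rows : List (List (String × String))) (raw_a : String) (raw_b : String) (out : String) : Decidable (Spec_h2h_series_summary_py rows raw_a raw_b out) := by unfold Spec_h2h_series_summary_py; infer_instance

-- ===== CLAIM (what is proved, stated in full; the proofs are below) =====
def Claim_equal_h2h_series_summary_py : Prop := ∀ (rows : List (List (String × String))) (raw_a : String) (raw_b : String), Dom_h2h_series_summary_py rows raw_a raw_b → Spec_h2h_series_summary_py rows raw_a raw_b (h2h_series_summary_py rows raw_a raw_b)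

-- ===== LEMMAS AND PROOFS =====

-- generic decision-shape facts used to align the two helper stacks
theorem pvScoreShape (Q D : String) :
    (if Q ≠ "" ∧ D ≠ "" then
      if Q = D then 2000 + PySem.Str.len Q
      else if PySem.Str.isIn Q D ∧ 3 ≤ PySem.Str.len Q then 1000 + PySem.Str.len Q
      else if PySem.Str.isIn D Q ∧ 3 ≤ PySem.Str.len D then 800 + PySem.Str.len D
      else 0
     else 0)
    = (if Q = "" || D = "" then 0
      else if Q = D then 2000 + PySem.Str.len Q
      else if 3 ≤ PySem.Str.len Q ∧ PySem.Str.isIn Q D then 1000 + PySem.Str.len Q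
      else if 3 ≤ PySem.Str.len D ∧ PySem.Str.isIn D Q then 800 + PySem.Str.len D
      else (0 : Int)) := by
  by_cases h1 : Q = "" <;> by_cases h2 : D = "" <;>
    simp only [h1, h2, ne_eq, not_true, not_false_iff, and_true, and_false,
      decide_true, decide_false, Bool.or_true, Bool.or_false, if_true, if_false] <;>
    split_ifs <;> first | rfl | tauto

theorem pvPreferShape (A B : String) :
    (if PySem.Str.len A < PySem.Str.len B then (1 : Int) else 0)
    = (if PySem.Str.len B ≤ PySem.Str.len A then 0 else 1) := by
  split_ifs <;> omega

theorem pvLooseShape (n v : String) (t : Bool) :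
    (!(n == "") && !(v == "") && t) = (if n = "" || v = "" then false else t) := by
  by_cases h1 : n = "" <;> by_cases h2 : v = "" <;> simp [h1, h2]

theorem pvSideShape (sa sb p : Int) (ma mb : Bool) :
    (if ¬ (sa = 0 ∧ sb = 0) then
      (if sa ≠ sb then (if sb < sa then some 0 else some 1) else some p)
     else
      (if ma = mb then (if ma then some p else none)
       else if ma then some 0 else some 1))
    = (if sa = 0 ∧ sb = 0 then
        (if ma && !mb then some 0
         else if mb && !ma then some 1
         else if ma && mb then some p
         else none)
      else if sb < sa then some (0 : Int)
      else if sa < sb then some 1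
      else some p) := by
  by_cases h : sa = 0 ∧ sb = 0
  · simp only [h]
    cases ma <;> cases mb <;> simp
  · simp only [h, not_false_iff, if_true, if_false]
    by_cases hlt : sb < sa
    · have hne : sa ≠ sb := by omega
      simp [hlt, hne]
    · by_cases hgt : sa < sb
      · have hne : sa ≠ sb := by omega
        simp [hlt, hgt, hne]
      · have heq : sa = sb := by omega
        simp [heq]

-- the two helper stacks agree
theorem altScore_eq (q d : String) : altScore q d = pvScore q d :=
  pvScoreShape (pvNormName q) (pvNormName d)

theorem altPrefer_eq (a b : String) : altPrefer a b = pvPreferLongerQuery a b :=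
  pvPreferShape (pvNormName a) (pvNormName b)

theorem altLoose_eq (a w : String) : altLoose a w = pvNameInDisplay a (some w) := by
  show (!(PySem.Str.strip (PySem.Str.lower a) == "") && !(PySem.Str.strip (PySem.Str.lower w) == "")
      && (PySem.Str.isIn (PySem.Str.strip (PySem.Str.lower a)) (PySem.Str.strip (PySem.Str.lower w))
          || PySem.Str.isIn (PySem.Str.strip (PySem.Str.lower w)) (PySem.Str.strip (PySem.Str.lower a)))) = _
  rw [pvLooseShape]
  rfl

theorem altSide_eq (a b : String) (w : Option String) : altSide a b w = pvWinnerSide a b w := by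
  unfold altSide pvWinnerSide
  cases w with
  | none => rfl
  | some s =>
    by_cases hs : s = ""
    · simp [hs]
    · simp only [hs, if_false, altScore_eq, altPrefer_eq, altLoose_eq]
      exact pvSideShape (pvScore a s) (pvScore b s) (pvPreferLongerQuery a b)
        (pvNameInDisplay a (some s)) (pvNameInDisplay b (some s))

theorem pvPrefer_cases (a b : String) : pvPreferLongerQuery a b = 0 ∨ pvPreferLongerQuery a b = 1 := by
  unfold pvPreferLongerQuery
  split_ifs <;> simp

-- the side is always none, some 0 or some 1
theorem pvWinnerSide_cases (a b : String) (w : Option String) :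
    pvWinnerSide a b w = none ∨ pvWinnerSide a b w = some 0 ∨ pvWinnerSide a b w = some 1 := by
  unfold pvWinnerSide
  cases w with
  | none => simp
  | some s =>
    rcases pvPrefer_cases a b with h | h <;> simp only [h] <;> split_ifs <;> simp

-- A's loop over keys, as three countP's
theorem pvFoldA (f : Option String → Option Int) (l : List (Option String)) (a b c : Int) :
    l.foldl (fun (t : Int × Int × Int) k =>
      if f k = some 0 then (t.1 + 1, t.2.1, t.2.2)
      else if f k = some 1 then (t.1, t.2.1 + 1, t.2.2)
      else (t.1, t.2.1, t.2.2 + 1)) (a, b, c)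
    = (a + l.countP (fun k => f k == some 0),
       b + l.countP (fun k => !(f k == some 0) && f k == some 1),
       c + l.countP (fun k => !(f k == some 0) && !(f k == some 1))) := by
  induction l generalizing a b c with
  | nil => simp
  | cons x xs ih =>
    simp only [List.foldl_cons, List.countP_cons]
    by_cases h0 : f x = some 0
    · simp [h0, ih]; omega
    · by_cases h1 : f x = some 1
      · simp [h1, ih]; omega
      · simp [h0, h1, ih]; omega

theorem pvSumIte {α : Type} (p : α → Bool) (g : α → Int) (l : List α) :
    (l.map (fun k => if p k then g k else 0)).sum = ((l.filter p).map g).sum := by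
  induction l with
  | nil => rfl
  | cons x xs ih => by_cases h : p x <;> simp [h, ih]

-- the weighted sum over the distinct keys equals the plain count over all keys
theorem pvSumDedupCount (p : Option String → Bool) (l : List (Option String)) :
    ((PySem.Set.ofList l).map (fun k => if p k then ((l.count k : Nat) : Int) else 0)).sum
      = (l.countP p : Int) := by
  rw [pvSumIte]
  have hperm : (PySem.Set.ofList l : List (Option String)).Perm l.dedup :=
    (List.perm_ext_iff_of_nodup (PySem.Set.nodup_ofList l) l.nodup_dedup).2
      (fun a => by rw [PySem.Set.mem_ofList, List.mem_dedup])
  have := ((hperm.filter p).map (fun k => ((l.count k : Nat) : Int))).sum_eq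
  rw [this]
  have hcast : ((l.dedup.filter p).map (fun k => ((l.count k : Nat) : Int))).sum
      = (((l.dedup.filter p).map (fun k => l.count k)).sum : Nat) := by
    rw [Nat.cast_list_sum, List.map_map]; rfl
  have hfun : (fun k : Option String => @List.count _ Option.instBEq k l)
      = (fun k => @List.count _ instBEqOfDecidableEq k l) := by
    funext k
    exact List.countP_congr (fun x _ => by by_cases h : x = k <;> simp [h])
  rw [hcast, hfun]
  exact congrArg (Nat.cast : Nat → Int) (List.sum_map_count_dedup_filter_eq_countP p l)

-- B's filtered weighted sum over the counter items, as a countP over all keys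
theorem pvSumItems (p : Option String → Bool) (keys : List (Option String)) :
    (((PySem.Dict.counter keys).items.filter (fun kc => p kc.1)).map Prod.snd).sum
      = (keys.countP p : Int) := by
  rw [PySem.Dict.items_counter, List.filter_map, List.map_map]
  have h := pvSumDedupCount p keys
  rw [pvSumIte] at h
  simpa [Function.comp_def] using h

-- ===== VERDICT (by name: the statement is the Claim_ definition above) =====
theorem h2h_series_summary_py_spec : Claim_equal_h2h_series_summary_py := by
  intro rows raw_a raw_b _
  unfold Spec_h2h_series_summary_py h2h_series_summary_py h2h_series_summary_py_alt
  by_cases hne : rows = []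
  · simp [hne]
  · simp only [hne, if_false, altSide_eq]
    have hA : rows.foldl (fun (t : Int × Int × Int) r =>
        let win := (PySem.Dict.mk r).get? "winner_name"
        let side := pvWinnerSide raw_a raw_b win
        if side = some 0 then (t.1 + 1, t.2.1, t.2.2)
        else if side = some 1 then (t.1, t.2.1 + 1, t.2.2)
        else (t.1, t.2.1, t.2.2 + 1)) (0, 0, 0)
        = (rows.map (fun r => (PySem.Dict.mk r).get? "winner_name")).foldl
            (fun (t : Int × Int × Int) k =>
              if pvWinnerSide raw_a raw_b k = some 0 then (t.1 + 1, t.2.1, t.2.2)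
              else if pvWinnerSide raw_a raw_b k = some 1 then (t.1, t.2.1 + 1, t.2.2)
              else (t.1, t.2.1, t.2.2 + 1)) (0, 0, 0) := by
      rw [List.foldl_map]
    set keys := rows.map (fun r => (PySem.Dict.mk r).get? "winner_name") with hkeys
    set f := pvWinnerSide raw_a raw_b with hf
    have h1 : keys.countP (fun k => !(f k == some 0) && (f k == some 1))
        = keys.countP (fun k => f k == some 1) :=
      List.countP_congr (fun k _ => by
        rcases pvWinnerSide_cases raw_a raw_b k with h | h | h <;> rw [← hf] at h <;> simp [h])
    have h2 : keys.countP (fun k => !(f k == some 0) && !(f k == some 1))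
        = keys.countP (fun k => f k == (none : Option Int)) :=
      List.countP_congr (fun k _ => by
        rcases pvWinnerSide_cases raw_a raw_b k with h | h | h <;> rw [← hf] at h <;> simp [h])
    simp only [hA, pvFoldA, zero_add, h1, h2]
    rw [pvSumItems (fun k => f k == some 0) keys,
        pvSumItems (fun k => f k == some 1) keys,
        pvSumItems (fun k => f k == (none : Option Int)) keys]
    split_ifs with hc <;> simp only [String.append_assoc, String.append_empty]
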